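-- pv_equiv track=rewrite | github.com/Zandolfus/aspects-of-power | python/tier_utils.py | validate_tier_thresholds
-- ===== SOURCE A (Python) =====
-- from typing import List, Optional, Dict, Tuple
--
-- def validate_tier_thresholds(tier_thresholds: List[int]) -> bool:
--     """Validate that tier thresholds are reasonable"""
--     if not tier_thresholds:
--         return True
--
--     # Check that thresholds are positive and in ascending order
--     sorted_thresholds = sorted(tier_thresholds)
--     return (
--         all(threshold > 0 for threshold in tier_thresholds) and
--         tier_thresholds == sorted_thresholds and
--         len(tier_thresholds) == len(set(tier_thresholds))  # No duplicates
--     )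
-- ===== SOURCE B (Python) =====
-- def validate_tier_thresholds(tier_thresholds):
--     """Validate that tier thresholds are reasonable (positive, strictly ascending)."""
--     prev = 0
--     for t in tier_thresholds:
--         if t <= prev:
--             return False
--         prev = t
--     return True
-- ===== Notes on version B (the rewrite author's own statement) =====
-- stated objective: faster
-- what changed: A sorts the list and builds a set to check ascending order and duplicates; B makes one linear pass keeping the previous element, since positive + sorted + no duplicates is exactly a strictly increasing chain starting above 0.
import Mathlib
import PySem

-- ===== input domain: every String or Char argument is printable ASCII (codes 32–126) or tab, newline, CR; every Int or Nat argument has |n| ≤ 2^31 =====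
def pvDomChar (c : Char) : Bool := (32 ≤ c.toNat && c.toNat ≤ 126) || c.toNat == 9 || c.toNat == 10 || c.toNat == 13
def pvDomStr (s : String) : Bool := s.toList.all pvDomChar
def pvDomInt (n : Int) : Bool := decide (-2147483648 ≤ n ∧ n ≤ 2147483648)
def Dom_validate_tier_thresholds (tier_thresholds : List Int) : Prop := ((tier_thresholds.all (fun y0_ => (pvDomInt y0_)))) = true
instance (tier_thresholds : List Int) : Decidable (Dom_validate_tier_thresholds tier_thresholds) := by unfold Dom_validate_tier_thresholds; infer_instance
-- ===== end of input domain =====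

-- B replaces A's sort + set construction by one linear pass over consecutive elements (faster: O(n) vs O(n log n)).

-- ===== PORT A =====
def validate_tier_thresholds (tier_thresholds : List Int) : Bool :=
  if tier_thresholds = [] then true
  else
    let sorted_thresholds := PySem.List.sorted tier_thresholds (fun x => x) false
    (tier_thresholds.all (fun threshold => decide (threshold > 0))) &&
    (tier_thresholds == sorted_thresholds) &&
    (tier_thresholds.length == PySem.Set.len (PySem.Set.ofList tier_thresholds))

-- ===== PORT B =====
-- the 'for t in …: if t <= prev: return False; prev = t' loop
def vttGo (prev : Int) : List Int → Bool
  | [] => true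
  | t :: rest => if t ≤ prev then false else vttGo t rest

def validate_tier_thresholds_alt (tier_thresholds : List Int) : Bool :=
  vttGo 0 tier_thresholds

-- ===== PRECONDITION & SPEC =====
def Spec_validate_tier_thresholds (tier_thresholds : List Int) (out : Bool) : Prop := out = validate_tier_thresholds_alt tier_thresholds
instance (tier_thresholds : List Int) (out : Bool) : Decidable (Spec_validate_tier_thresholds tier_thresholds out) := by unfold Spec_validate_tier_thresholds; infer_instance

-- ===== CLAIM (what is proved, stated in full; the proofs are below) =====
def Claim_equal_validate_tier_thresholds : Prop := ∀ (tier_thresholds : List Int), Dom_validate_tier_thresholds tier_thresholds → Spec_validate_tier_thresholds tier_thresholds (validate_tier_thresholds tier_thresholds)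

-- ===== LEMMAS AND PROOFS =====

theorem vttGo_iff_chain (p : Int) (l : List Int) :
    vttGo p l = true ↔ (p :: l).IsChain (· < ·) := by
  induction l generalizing p with
  | nil => simp [vttGo]
  | cons t rest ih =>
    rw [List.isChain_cons_cons]
    simp only [vttGo]
    split_ifs with h
    · simp; omega
    · rw [ih]; constructor
      · exact fun hc => ⟨by omega, hc⟩
      · exact fun hc => hc.2

theorem foldl_add_of_nodup (l s : List Int) (h : (s ++ l).Nodup) :
    l.foldl PySem.Set.add s = s ++ l := by
  induction l generalizing s with
  | nil => simp
  | cons a t ih =>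
    have ha : a ∉ s := by
      intro hs
      exact (List.disjoint_of_nodup_append h) hs (by simp)
    have hadd : PySem.Set.add s a = s ++ [a] := by
      simp [PySem.Set.add, PySem.Set.contains]
      intro hc
      exact absurd hc ha
    have h' : ((s ++ [a]) ++ t).Nodup := by
      simpa [List.append_assoc] using h
    simp only [List.foldl_cons, hadd]
    rw [ih (s ++ [a]) h', List.append_assoc]
    simp

theorem ofList_eq_self_of_nodup (l : List Int) (h : l.Nodup) :
    PySem.Set.ofList l = l := by
  rw [PySem.Set.ofList_eq_foldl]
  simpa using foldl_add_of_nodup l [] (by simpa using h)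

theorem length_ofList_eq_card (l : List Int) :
    (PySem.Set.ofList l).length = l.toFinset.card := by
  have hnd : (PySem.Set.ofList l).Nodup := PySem.Set.nodup_ofList l
  have hfs : (PySem.Set.ofList l).toFinset = l.toFinset := by
    ext x
    simp [List.mem_toFinset, PySem.Set.mem_ofList]
  rw [← List.toFinset_card_of_nodup hnd, hfs]

theorem len_eq_iff_nodup (l : List Int) :
    l.length = (PySem.Set.ofList l).length ↔ l.Nodup := by
  constructor
  · intro h
    rw [length_ofList_eq_card] at h
    rw [List.card_toFinset] at h
    exact List.dedup_eq_self.mp ((List.dedup_sublist l).eq_of_length h.symm)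
  · intro h
    rw [ofList_eq_self_of_nodup l h]

theorem eq_sorted_iff_pairwise (l : List Int) :
    l = PySem.List.sorted l (fun x => x) false ↔ l.Pairwise (· ≤ ·) := by
  constructor
  · intro h
    have := PySem.List.sorted_pairwise (xs := l) (key := fun x => x)
    rw [← h] at this
    exact this
  · intro h
    exact (PySem.List.sorted_eq_self_of_pairwise l _ h).symm

theorem validate_iff (l : List Int) :
    validate_tier_thresholds l = true ↔ ((0 : Int) :: l).IsChain (· < ·) := by
  rcases eq_or_ne l [] with rfl | hne
  · simp [validate_tier_thresholds]
  · rw [List.isChain_iff_pairwise, List.pairwise_cons]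
    simp only [validate_tier_thresholds, if_neg hne, Bool.and_eq_true, beq_iff_eq,
      List.all_eq_true, decide_eq_true_eq, PySem.Set.len]
    simp only [Nat.cast_inj]
    rw [eq_sorted_iff_pairwise, len_eq_iff_nodup]
    constructor
    · rintro ⟨⟨hpos, hle⟩, hnd⟩
      refine ⟨fun a ha => hpos a ha, ?_⟩
      have := hle.and hnd
      exact this.imp (fun {a b} h => lt_of_le_of_ne h.1 h.2)
    · rintro ⟨hpos, hlt⟩
      exact ⟨⟨fun a ha => hpos a ha, hlt.imp (fun {a b} h => le_of_lt h)⟩,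
        hlt.imp (fun {a b} h => ne_of_lt h)⟩

-- ===== VERDICT (by name: the statement is the Claim_ definition above) =====
theorem validate_tier_thresholds_spec : Claim_equal_validate_tier_thresholds := by
  intro l _
  unfold Spec_validate_tier_thresholds validate_tier_thresholds_alt
  rw [Bool.eq_iff_iff, validate_iff, vttGo_iff_chain]
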